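-- pv_equiv track=rewrite | github.com/Andreeduardopp/satelite_crop_classificator_ia | src/treinamento/treinar_classificador_vit_v2.py | expandir_registros
-- ===== SOURCE A (Python) =====
-- def expandir_registros(registros: list[list[tuple[str, int]]], labels: list[int]
--                        ) -> tuple[list[str], list[int], list[int]]:
--     """Expande registros em listas planas de (caminhos, dias, labels)."""
--     caminhos = []
--     dias = []
--     labels_exp = []
--     for items, label in zip(registros, labels):
--         for caminho, dia in items:
--             caminhos.append(caminho)
--             dias.append(dia)
--             labels_exp.append(label)
--     return caminhos, dias, labels_exp
-- ===== SOURCE B (Python) =====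
-- def expandir_registros(registros: list[list[tuple[str, int]]], labels: list[int]
--                        ) -> tuple[list[str], list[int], list[int]]:
--     """Expande registros em listas planas de (caminhos, dias, labels)."""
--     if not registros or not labels:
--         return [], [], []
--     items, label = registros[0], labels[0]
--     c, d, l = expandir_registros(registros[1:], labels[1:])
--     return ([caminho for caminho, _ in items] + c,
--             [dia for _, dia in items] + d,
--             [label] * len(items) + l)
-- ===== Notes on version B (the rewrite author's own statement) =====
-- stated objective: alternative
-- what changed: B recurses on the record structure, handling the head record and prepending its columns (labels produced by replication [label]*len(items)) to the recursively expanded tail, instead of A's iterative single pass appending element-by-element to three accumulator lists.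
import Mathlib
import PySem

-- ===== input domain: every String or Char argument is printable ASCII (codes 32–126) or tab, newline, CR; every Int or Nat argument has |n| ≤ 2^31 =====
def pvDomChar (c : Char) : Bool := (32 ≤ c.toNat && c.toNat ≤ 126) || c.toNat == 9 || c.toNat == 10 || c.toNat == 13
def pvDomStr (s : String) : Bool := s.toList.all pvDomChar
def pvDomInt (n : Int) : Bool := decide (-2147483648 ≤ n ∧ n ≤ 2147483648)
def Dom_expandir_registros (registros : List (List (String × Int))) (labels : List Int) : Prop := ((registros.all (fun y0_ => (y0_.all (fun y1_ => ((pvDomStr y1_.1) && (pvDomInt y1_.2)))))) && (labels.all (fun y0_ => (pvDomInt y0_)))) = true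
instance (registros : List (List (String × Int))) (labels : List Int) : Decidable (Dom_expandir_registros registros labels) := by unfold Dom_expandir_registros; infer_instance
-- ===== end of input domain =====

-- B recurses on the record structure (head columns, with labels by replication, prepended to the recursively expanded tail) instead of A's iterative triple-accumulator pass; alternative decomposition, same cost.


-- ===== PORT A =====
-- literal port of A: one pass over zip(registros, labels), appending to three parallel lists
def expandir_registros (registros : List (List (String × Int))) (labels : List Int) : List String × List Int × List Int :=
  (registros.zip labels).foldl
    (fun acc p =>
      p.1.foldl
        (fun acc2 q => (acc2.1 ++ [q.1], acc2.2.1 ++ [q.2], acc2.2.2 ++ [p.2]))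
        acc)
    ([], [], [])

-- ===== PORT B =====
-- port of B: recursion on the records, prepending the head record's columns
-- ([label]*len(items) -> List.replicate) to the recursively expanded tail
def expandir_registros_alt (registros : List (List (String × Int))) (labels : List Int) : List String × List Int × List Int :=
  match registros, labels with
  | [], _ => ([], [], [])
  | _, [] => ([], [], [])
  | items :: rt, label :: lt =>
    let r := expandir_registros_alt rt lt
    (items.map (fun q => q.1) ++ r.1,
     items.map (fun q => q.2) ++ r.2.1,
     List.replicate items.length label ++ r.2.2)

-- ===== PRECONDITION & SPEC =====
def Spec_expandir_registros (registros : List (List (String × Int))) (labels : List Int) (out : List String × List Int × List Int) : Prop := out = expandir_registros_alt registros labels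
instance (registros : List (List (String × Int))) (labels : List Int) (out : List String × List Int × List Int) : Decidable (Spec_expandir_registros registros labels out) := by unfold Spec_expandir_registros; infer_instance

-- ===== CLAIM (what is proved, stated in full; the proofs are below) =====
def Claim_equal_expandir_registros : Prop := ∀ (registros : List (List (String × Int))) (labels : List Int), Dom_expandir_registros registros labels → Spec_expandir_registros registros labels (expandir_registros registros labels)

-- ===== LEMMAS AND PROOFS =====
-- A's inner loop characterised with a generalized accumulator
theorem inner_foldl_char (items : List (String × Int)) (label : Int)
    (acc : List String × List Int × List Int) :
    items.foldl (fun acc2 q => (acc2.1 ++ [q.1], acc2.2.1 ++ [q.2], acc2.2.2 ++ [label])) acc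
      = (acc.1 ++ items.map (fun q => q.1),
         acc.2.1 ++ items.map (fun q => q.2),
         acc.2.2 ++ List.replicate items.length label) := by
  induction items generalizing acc with
  | nil => simp
  | cons h t ih => simp [List.foldl_cons, ih, List.replicate_succ]

-- A's outer loop from any accumulator appends exactly B's three columns
theorem outer_foldl_char (registros : List (List (String × Int))) (labels : List Int)
    (acc : List String × List Int × List Int) :
    (registros.zip labels).foldl
      (fun acc p =>
        p.1.foldl (fun acc2 q => (acc2.1 ++ [q.1], acc2.2.1 ++ [q.2], acc2.2.2 ++ [p.2])) acc) acc
      = (acc.1 ++ (expandir_registros_alt registros labels).1,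
         acc.2.1 ++ (expandir_registros_alt registros labels).2.1,
         acc.2.2 ++ (expandir_registros_alt registros labels).2.2) := by
  induction registros generalizing labels acc with
  | nil => simp [expandir_registros_alt]
  | cons items rt ih =>
    cases labels with
    | nil => simp [expandir_registros_alt]
    | cons label lt =>
      rw [List.zip_cons_cons, List.foldl_cons, inner_foldl_char, ih]
      simp [expandir_registros_alt]

-- ===== VERDICT (by name: the statement is the Claim_ definition above) =====
theorem expandir_registros_spec : Claim_equal_expandir_registros := by
  intro registros labels _
  unfold Spec_expandir_registros expandir_registros
  rw [outer_foldl_char]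
  simp
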